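-- pv_equiv track=rewrite | github.com/jin2gh/leetcode | py3/lcof/61.py | isStraight
-- ===== SOURCE A (Python) =====
-- from typing import List
--
-- def isStraight(nums: List[int]) -> bool:
--     n = 14
--     cnts = [0] * n
--     for v in nums:
--         cnts[v] += 1
--
--     st, ed = 0, 0
--     for i in range(1, n):
--         if cnts[i] > 1: return False
--         if cnts[i] > 0:
--             if not st: st = i
--             ed = i
--
--     return ed - st < 5
-- ===== SOURCE B (Python) =====
-- from typing import List
--
-- def isStraight(nums: List[int]) -> bool:
--     cards = sorted(v for v in nums if v != 0)
--     if not cards: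
--         return True
--     for prev, cur in zip(cards, cards[1:]):
--         if prev == cur:
--             return False
--     return cards[-1] - cards[0] < 5
-- ===== Notes on version B (the rewrite author's own statement) =====
-- stated objective: idiomatic
-- what changed: B replaces A's fixed 14-slot histogram with st/ed tracking over the range 1..13 by the idiomatic sort-then-scan: drop jokers, sort, fail on any equal adjacent pair, else compare last - first < 5; Pre_ excludes inputs on which A raises IndexError (a value >= 14 or < -14) and the negative-value hands whose verdict depends on Python's negative-index wraparound (A silently counts v in -14..-1 as the card v+14); …
-- outside the precondition, e.g. on isStraight([-1, 10]): A returns True, B returns False; on isStraight([-14, -1]): A returns True, B returns False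
import Mathlib
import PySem

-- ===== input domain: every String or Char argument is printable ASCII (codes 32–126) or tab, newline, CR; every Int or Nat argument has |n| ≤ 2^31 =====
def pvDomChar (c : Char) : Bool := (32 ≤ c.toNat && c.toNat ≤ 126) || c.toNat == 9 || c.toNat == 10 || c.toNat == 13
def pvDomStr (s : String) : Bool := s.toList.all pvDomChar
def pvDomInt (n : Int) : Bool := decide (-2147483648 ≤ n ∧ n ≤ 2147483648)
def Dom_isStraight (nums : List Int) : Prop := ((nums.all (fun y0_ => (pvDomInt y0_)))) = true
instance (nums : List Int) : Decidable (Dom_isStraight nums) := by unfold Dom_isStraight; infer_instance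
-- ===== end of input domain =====

-- B replaces A's 14-slot histogram + range-1..13 scan by the idiomatic sort-then-adjacent-scan
-- on the joker-filtered cards; Pre_ excludes the inputs where A raises or where its value
-- depends on Python's negative-index wraparound.


-- ===== PORT A =====
-- 'for v in nums: cnts[v] += 1'  (cnts[v] with Python index semantics via pyGet?/pySetD: none = IndexError)
def countLoop (cnts : List Int) : List Int → Option (List Int)
  | [] => some cnts
  | v :: rest =>
    match PySem.List.pyGet? cnts v with
    | none => none
    | some c => countLoop (PySem.List.pySetD cnts v (c + 1)) rest

-- 'for i in range(1, n): ...' with the early 'return False' and the st/ed accumulators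
def scanLoop (cnts : List Int) : List Int → Int → Int → Bool
  | [], st, ed => decide (ed - st < 5)
  | i :: rest, st, ed =>
    if PySem.List.pyGetD cnts i 0 > 1 then false
    else if PySem.List.pyGetD cnts i 0 > 0 then
      scanLoop cnts rest (if st = 0 then i else st) i
    else scanLoop cnts rest st ed

def isStraight (nums : List Int) : Bool :=
  match countLoop (List.replicate 14 0) nums with
  | none => false
  | some cnts => scanLoop cnts (PySem.List.pyRange 1 14 1) 0 0

-- ===== PORT B =====
-- 'for prev, cur in zip(cards, cards[1:]): if prev == cur: return False'
def hasAdjDup : List Int → Bool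
  | a :: b :: rest => if a = b then true else hasAdjDup (b :: rest)
  | _ => false

def isStraight_alt (nums : List Int) : Bool :=
  let cards := PySem.List.sorted (nums.filter (fun v => v != 0)) (fun x => x) false
  match cards with
  | [] => true
  | c :: _ =>
    if hasAdjDup cards then false
    else decide (cards.getLastD 0 - c < 5)

-- ===== PRECONDITION & SPEC =====
-- Pre_ excludes inputs on which A raises IndexError (a value >= 14 or < -14) and, of the inputs
-- with a negative value -14..-1 (which A silently counts as the card v+14 via Python's negative
-- list indexing, an artefact outside the natural card domain 0..13), keeps those whose verdict
-- the wraparound cannot change: hands with no positive card and no -14 (the wraparound shifts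
-- every card equally), hands with a repeated non-joker card, a same-sign pair at distance >= 5,
-- or a positive/negative pair at distance 5..9 or >= 19 (both programs reject those regardless).
def Pre_isStraight (nums : List Int) : Prop :=
  (∀ v ∈ nums, -14 ≤ v ∧ v ≤ 13) ∧
    ((∀ v ∈ nums, 0 ≤ v) ∨
      (∀ v ∈ nums, -14 < v ∧ v ≤ 0) ∨
      (∃ a ∈ nums, ∃ b ∈ nums, 5 ≤ b - a ∧
        ((0 < a ∧ 0 < b) ∨ (-14 < a ∧ b < 0) ∨
          (-14 < a ∧ a < 0 ∧ 0 < b ∧ (b - a ≤ 9 ∨ 19 ≤ b - a)))) ∨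
      (∃ v ∈ nums, v ≠ 0 ∧ -14 < v ∧ 2 ≤ nums.count v))
instance (nums : List Int) : Decidable (Pre_isStraight nums) := by unfold Pre_isStraight; infer_instance
def pvWitness_isStraight : List Int := [0, 2, 3, 4, 5]

def Spec_isStraight (nums : List Int) (out : Bool) : Prop := out = isStraight_alt nums
instance (nums : List Int) (out : Bool) : Decidable (Spec_isStraight nums out) := by unfold Spec_isStraight; infer_instance

-- ===== CLAIM (what is proved, stated in full; the proofs are below) =====
def Claim_equal_isStraight : Prop := ∀ (nums : List Int), Dom_isStraight nums → Pre_isStraight nums → Spec_isStraight nums (isStraight nums)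

-- ===== LEMMAS AND PROOFS =====
theorem pyIdx14 (v : Int) (h0 : -14 ≤ v) (h1 : v ≤ 13) :
    PySem.List.pyIdx? 14 v = some ((PySem.Int.mod v 14).toNat) := by
  have hm : PySem.Int.mod v 14 = v % 14 := PySem.Int.mod_eq_emod_of_pos (by norm_num)
  unfold PySem.List.pyIdx?
  rw [hm]
  by_cases ha : 0 ≤ v
  · rw [if_pos ha, if_pos (by push_cast; omega)]
    congr 1; omega
  · rw [if_neg ha, if_pos (by push_cast; omega)]
    congr 1; omega

theorem get_set_mod (cnts : List Int) (v : Int) (hl : cnts.length = 14)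
    (h0 : -14 ≤ v) (h1 : v ≤ 13) :
    PySem.List.pyGet? cnts v = some (PySem.List.pyGetD cnts (PySem.Int.mod v 14) 0) ∧
    ∀ x : Int, PySem.List.pySetD cnts v x = PySem.List.pySetD cnts (PySem.Int.mod v 14) x := by
  have hmn : 0 ≤ PySem.Int.mod v 14 := PySem.Int.mod_nonneg _ (by norm_num)
  have hml : PySem.Int.mod v 14 < 14 := PySem.Int.mod_lt _ (by norm_num)
  have hidx : PySem.List.pyIdx? cnts.length v = some ((PySem.Int.mod v 14).toNat) := by
    rw [hl]; exact pyIdx14 v h0 h1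
  have hlt : (PySem.Int.mod v 14).toNat < cnts.length := by omega
  constructor
  · show (PySem.List.pyIdx? cnts.length v).bind _ = _
    rw [hidx, PySem.List.pyGetD_eq_getElem _ _ hmn (by omega)]
    simp [List.getElem?_eq_getElem hlt]
  · intro x
    rw [PySem.List.pySetD_of_nonneg _ _ hmn]
    show (PySem.List.pySet? cnts v x).getD cnts = _
    unfold PySem.List.pySet?
    rw [hidx]
    rfl

theorem count_hist (nums : List Int) :
    ∀ (cnts : List Int), (∀ v ∈ nums, -14 ≤ v ∧ v ≤ 13) → cnts.length = 14 →
    ∃ cnts', countLoop cnts nums = some cnts' ∧ cnts'.length = 14 ∧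
      ∀ i : Int, 0 ≤ i → i < 14 → PySem.List.pyGetD cnts' i 0 =
        PySem.List.pyGetD cnts i 0 + nums.countP (fun v => PySem.Int.mod v 14 == i) := by
  induction nums with
  | nil => intro cnts _ hlen; exact ⟨cnts, rfl, hlen, by simp⟩
  | cons v rest ih =>
    intro cnts hpre hlen
    obtain ⟨hv0, hv13⟩ := hpre v (by simp)
    obtain ⟨hget, hset⟩ := get_set_mod cnts v hlen hv0 hv13
    set w := PySem.Int.mod v 14 with hw_def
    have hwn : 0 ≤ w := PySem.Int.mod_nonneg _ (by norm_num)
    have hwl : w < 14 := PySem.Int.mod_lt _ (by norm_num)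
    obtain ⟨cnts', hrun, hlen', hval⟩ := ih (PySem.List.pySetD cnts w (PySem.List.pyGetD cnts w 0 + 1))
      (fun x hx => hpre x (by simp [hx])) (by rw [PySem.List.length_pySetD]; exact hlen)
    refine ⟨cnts', ?_, hlen', ?_⟩
    · simp only [countLoop, hget]
      rw [hset]; exact hrun
    · intro i hi0 hi14
      rw [hval i hi0 hi14]
      have hcw : ((w.toNat : Int)) = w := Int.toNat_of_nonneg hwn
      have hci : ((i.toNat : Int)) = i := Int.toNat_of_nonneg hi0
      have hsd := PySem.List.pyGetD_pySetD_natCast cnts w.toNat i.toNat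
        (PySem.List.pyGetD cnts w 0 + 1) 0 (by omega)
      rw [hcw, hci] at hsd
      rw [hsd, List.countP_cons]
      by_cases h : i = w
      · subst h
        simp only [hw_def, beq_self_eq_true, if_true]
        push_cast
        omega
      · have hb : (PySem.Int.mod v 14 == i) = false := by
          rw [← hw_def]; exact beq_eq_false_iff_ne.mpr (fun e => h e.symm)
        rw [if_neg (show ¬ i.toNat = w.toNat by omega), hb]
        simp

-- scanB: scanLoop once no count exceeds 1 -- the early 'return False' branch never fires
def scanB (d : Int → Bool) : List Int → Int → Int → Bool
  | [], st, ed => decide (ed - st < 5)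
  | i :: rest, st, ed =>
    if d i then scanB d rest (if st = 0 then i else st) i
    else scanB d rest st ed

theorem scan_false (cnts : List Int) (is : List Int) :
    ∀ st ed, (∃ i ∈ is, PySem.List.pyGetD cnts i 0 > 1) → scanLoop cnts is st ed = false := by
  induction is with
  | nil => rintro st ed ⟨i, hi, _⟩; simp at hi
  | cons j rest ih =>
    rintro st ed ⟨i, hi, hgt⟩
    simp only [scanLoop]
    rcases List.mem_cons.mp hi with h | h
    · subst h; rw [if_pos hgt]
    · split_ifs <;> first | rfl | exact ih _ _ ⟨i, h, hgt⟩

theorem scan_eq_scanB (cnts : List Int) (is : List Int) :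
    ∀ st ed, (∀ i ∈ is, PySem.List.pyGetD cnts i 0 ≤ 1) →
    scanLoop cnts is st ed = scanB (fun i => decide (PySem.List.pyGetD cnts i 0 > 0)) is st ed := by
  induction is with
  | nil => intro st ed _; rfl
  | cons j rest ih =>
    intro st ed hle
    have hj := hle j (by simp)
    by_cases h : PySem.List.pyGetD cnts j 0 > 0
    · simp only [scanLoop, scanB, if_neg (by omega : ¬ PySem.List.pyGetD cnts j 0 > 1),
        if_pos h, decide_eq_true_eq]
      exact ih _ _ (fun i hi => hle i (by simp [hi]))
    · simp only [scanLoop, scanB, if_neg (by omega : ¬ PySem.List.pyGetD cnts j 0 > 1),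
        if_neg h, decide_eq_true_eq]
      exact ih _ _ (fun i hi => hle i (by simp [hi]))

theorem scanB_congr (d₁ d₂ : Int → Bool) (is : List Int) :
    ∀ st ed, (∀ i ∈ is, d₁ i = d₂ i) → scanB d₁ is st ed = scanB d₂ is st ed := by
  induction is with
  | nil => intros; rfl
  | cons j rest ih =>
    intro st ed h
    simp only [scanB, h j (by simp)]
    split_ifs <;> exact ih _ _ (fun i hi => h i (by simp [hi]))

theorem scanB_nil_filter (d : Int → Bool) (is : List Int) :
    ∀ st ed, is.filter d = [] → scanB d is st ed = decide (ed - st < 5) := by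
  induction is with
  | nil => intros; rfl
  | cons j rest ih =>
    intro st ed h
    rw [List.filter_eq_nil_iff] at h
    have hd : d j = false := Bool.eq_false_iff.mpr (h j (by simp))
    simp only [scanB, hd, Bool.false_eq_true, if_false]
    exact ih _ _ (List.filter_eq_nil_iff.mpr (fun a ha => h a (by simp [ha])))

theorem scanB_filter (d : Int → Bool) (is : List Int) :
    ∀ st ed, (∀ i ∈ is, 0 < i) → 0 ≤ st → is.filter d ≠ [] →
    scanB d is st ed =
      decide ((is.filter d).getLastD 0 - (if st = 0 then (is.filter d).headD 0 else st) < 5) := by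
  induction is with
  | nil => intro _ _ _ _ h; simp at h
  | cons j rest ih =>
    intro st ed hpos hst hne
    by_cases hd : d j = true
    · have hfc : (j :: rest).filter d = j :: rest.filter d := by simp [hd]
      have hj := hpos j (by simp)
      have hst' : (0:Int) ≤ if st = 0 then j else st := by split_ifs <;> omega
      have hstne : ¬ (if st = 0 then j else st) = 0 := by split_ifs with h <;> omega
      rw [hfc]
      simp only [scanB, hd, if_pos]
      by_cases hfr : rest.filter d = []
      · rw [scanB_nil_filter d rest _ _ hfr, hfr]
        simp
      · rw [ih _ _ (fun i hi => hpos i (by simp [hi])) hst' hfr]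
        rw [if_neg hstne]
        congr 1
        have hgl : (j :: rest.filter d).getLastD 0 = (rest.filter d).getLastD 0 := by
          cases h : rest.filter d with
          | nil => exact absurd h hfr
          | cons a t => simp
        rw [hgl, List.headD_cons]
    · have hfc : (j :: rest).filter d = rest.filter d := by
        simp [Bool.eq_false_iff.mpr hd]
      rw [hfc] at hne ⊢
      simp only [scanB, hd, Bool.false_eq_true, if_false]
      exact ih _ _ (fun i hi => hpos i (by simp [hi])) hst hne

theorem hasAdjDup_false_iff (l : List Int) (h : l.Pairwise (· ≤ ·)) :
    hasAdjDup l = false ↔ l.Nodup := by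
  induction l with
  | nil => simp [hasAdjDup]
  | cons a rest ih =>
    cases rest with
    | nil => simp [hasAdjDup]
    | cons b t =>
      rw [List.pairwise_cons] at h
      obtain ⟨hle, hbt⟩ := h
      by_cases hab : a = b
      · subst hab
        simp [hasAdjDup, List.nodup_cons]
      · have hiff := ih hbt
        simp only [hasAdjDup, if_neg hab]
        rw [hiff]
        constructor
        · intro hnd
          rw [List.nodup_cons]
          refine ⟨fun hmem => ?_, hnd⟩
          rcases List.mem_cons.mp hmem with h | h
          · exact hab h
          · have hba : b ≤ a := (List.pairwise_cons.mp hbt).1 a h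
            have hab' : a ≤ b := hle b (by simp)
            exact hab (le_antisymm hab' hba)
        · exact fun h => (List.nodup_cons.mp h).2

theorem pairwise_lt_of_le_nodup (l : List Int) (h : l.Pairwise (· ≤ ·)) (hnd : l.Nodup) :
    l.Pairwise (· < ·) :=
  (h.and hnd).imp (fun hab => lt_of_le_of_ne hab.1 hab.2)

theorem eq_of_pairwise_lt_of_mem_iff (l₁ l₂ : List Int)
    (h₁ : l₁.Pairwise (· < ·)) (h₂ : l₂.Pairwise (· < ·))
    (hm : ∀ x, x ∈ l₁ ↔ x ∈ l₂) : l₁ = l₂ := by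
  have hnd₁ : l₁.Nodup := h₁.imp (fun h => ne_of_lt h)
  have hnd₂ : l₂.Nodup := h₂.imp (fun h => ne_of_lt h)
  have hperm : l₁.Perm l₂ := by
    apply List.perm_of_nodup_nodup_toFinset_eq hnd₁ hnd₂
    apply Finset.ext
    intro x
    simp [List.mem_toFinset, hm x]
  exact List.Perm.eq_of_pairwise
    (fun a b _ _ h1 h2 => absurd h1 (not_lt.mpr (le_of_lt h2))) h₁ h₂ hperm

theorem getD_replicate_zero (i : Int) (h0 : 0 ≤ i) (h14 : i < 14) :
    PySem.List.pyGetD (List.replicate 14 (0:Int)) i 0 = 0 := by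
  rw [PySem.List.pyGetD_eq_getElem _ _ h0 (by simp; omega)]
  exact List.getElem_replicate _

theorem le_getLastD_of_pairwise (l : List Int) (hp : l.Pairwise (· ≤ ·)) :
    ∀ x ∈ l, x ≤ l.getLastD 0 := by
  intro x hx
  have hne : l ≠ [] := List.ne_nil_of_mem hx
  have hlen : 0 < l.length := List.length_pos_iff.mpr hne
  have hgl : l.getLastD 0 = l[l.length - 1] := by
    rw [List.getLastD_eq_getLast?, List.getLast?_eq_getElem?]
    simp [List.getElem?_eq_getElem (by omega : l.length - 1 < l.length)]
  obtain ⟨i, hi, rfl⟩ := List.mem_iff_getElem.mp hx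
  rw [hgl]
  rcases Nat.lt_or_ge i (l.length - 1) with h | h
  · exact (List.pairwise_iff_getElem.mp hp) i (l.length - 1) hi (by omega) h
  · have : i = l.length - 1 := by omega
    subst this; exact le_refl _

theorem headD_le_of_pairwise (l : List Int) (hp : l.Pairwise (· ≤ ·)) :
    ∀ x ∈ l, l.headD 0 ≤ x := by
  intro x hx
  cases l with
  | nil => simp at hx
  | cons a t =>
    rcases List.mem_cons.mp hx with h | h
    · subst h; simp
    · simpa using (List.pairwise_cons.mp hp).1 x h

theorem alt_false_of_span (nums : List Int) (a b : Int)
    (ha : a ∈ nums) (hbm : b ∈ nums) (ha0 : a ≠ 0) (hb0 : b ≠ 0) (h5 : 5 ≤ b - a) :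
    isStraight_alt nums = false := by
  set fs := nums.filter (fun v => v != 0) with hfs_def
  set cards := PySem.List.sorted fs (fun x : Int => x) false with hcards_def
  have hple : cards.Pairwise (· ≤ ·) := PySem.List.sorted_pairwise fs (fun x : Int => x)
  have ham : a ∈ cards := by
    rw [hcards_def, PySem.List.mem_sorted, hfs_def, List.mem_filter]
    exact ⟨ha, by simpa using ha0⟩
  have hbmem : b ∈ cards := by
    rw [hcards_def, PySem.List.mem_sorted, hfs_def, List.mem_filter]
    exact ⟨hbm, by simpa using hb0⟩
  cases hc : cards with
  | nil => rw [hc] at ham; simp at ham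
  | cons c rest =>
    rw [isStraight_alt]
    simp only [← hfs_def, ← hcards_def, hc]
    rw [hc] at hple ham hbmem
    by_cases hadj : hasAdjDup (c :: rest) = true
    · simp [hadj]
    · have hlast : b ≤ (c :: rest).getLastD 0 := le_getLastD_of_pairwise _ hple b hbmem
      have hhead : c ≤ a := headD_le_of_pairwise _ hple a ham
      simp only [hadj, Bool.false_eq_true, if_false]
      exact decide_eq_false (by omega)

theorem alt_false_of_dup (nums : List Int) (v : Int)
    (hv : v ∈ nums) (hv0 : v ≠ 0) (hd : 2 ≤ nums.count v) :
    isStraight_alt nums = false := by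
  set fs := nums.filter (fun u => u != 0) with hfs_def
  set cards := PySem.List.sorted fs (fun x : Int => x) false with hcards_def
  have hple : cards.Pairwise (· ≤ ·) := PySem.List.sorted_pairwise fs (fun x : Int => x)
  have hvm : v ∈ cards := by
    rw [hcards_def, PySem.List.mem_sorted, hfs_def, List.mem_filter]
    exact ⟨hv, by simpa using hv0⟩
  have hcnt : 2 ≤ cards.count v := by
    have hperm : cards.Perm fs := PySem.List.sorted_perm fs _ false
    rw [hperm.count_eq, hfs_def, List.count_filter (by simpa using hv0)]
    exact hd
  have hnd : ¬ cards.Nodup := fun h => by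
    have := List.nodup_iff_count_le_one.mp h v
    omega
  have hadj : hasAdjDup cards = true := by
    cases h : hasAdjDup cards with
    | true => rfl
    | false => exact absurd ((hasAdjDup_false_iff cards hple).mp h) hnd
  cases hc : cards with
  | nil => rw [hc] at hvm; simp at hvm
  | cons c rest =>
    rw [isStraight_alt]
    simp only [← hfs_def, ← hcards_def, hc]
    rw [hc] at hadj
    simp [hadj]

theorem isStraight_false_of_slots (nums : List Int) (i j : Int)
    (hb : ∀ v ∈ nums, -14 ≤ v ∧ v ≤ 13)
    (h1 : 1 ≤ i) (hj : j ≤ 13) (h5 : 5 ≤ j - i)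
    (hci : 0 < nums.countP (fun v => PySem.Int.mod v 14 == i))
    (hcj : 0 < nums.countP (fun v => PySem.Int.mod v 14 == j)) :
    isStraight nums = false := by
  obtain ⟨cnts, hrun, hlen, hval⟩ := count_hist nums (List.replicate 14 0) hb (by simp)
  have hval0 : ∀ k : Int, 0 ≤ k → k < 14 →
      PySem.List.pyGetD cnts k 0 = (nums.countP (fun v => PySem.Int.mod v 14 == k) : Int) := by
    intro k h0 h14
    rw [hval k h0 h14, getD_replicate_zero k h0 h14]; ring
  have hA : isStraight nums = scanLoop cnts (PySem.List.pyRange 1 14 1) 0 0 := by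
    rw [isStraight, hrun]
  have hcp : 0 < PySem.List.pyGetD cnts i 0 := by
    rw [hval0 i (by omega) (by omega)]
    exact_mod_cast hci
  have hcq : 0 < PySem.List.pyGetD cnts j 0 := by
    rw [hval0 j (by omega) (by omega)]
    exact_mod_cast hcj
  by_cases hle1 : ∀ k ∈ PySem.List.pyRange 1 14 1, PySem.List.pyGetD cnts k 0 ≤ 1
  · rw [hA, scan_eq_scanB cnts _ _ _ hle1]
    set d := fun k => decide (PySem.List.pyGetD cnts k 0 > 0) with hd_def
    set ps := (PySem.List.pyRange 1 14 1).filter d with hps_def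
    have hpmem : i ∈ ps := by
      rw [hps_def, List.mem_filter]
      exact ⟨PySem.List.mem_pyRange_one.mpr ⟨by omega, by omega⟩, by simp [hd_def, hcp]⟩
    have hqmem : j ∈ ps := by
      rw [hps_def, List.mem_filter]
      exact ⟨PySem.List.mem_pyRange_one.mpr ⟨by omega, by omega⟩, by simp [hd_def, hcq]⟩
    have hppw : ps.Pairwise (· ≤ ·) :=
      (List.Pairwise.filter d (PySem.List.pairwise_lt_pyRange_one 1 14)).imp le_of_lt
    have hpsne : ps ≠ [] := List.ne_nil_of_mem hpmem
    rw [scanB_filter d _ _ _ (fun k hk => by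
          have := (PySem.List.mem_pyRange_one.mp hk).1; omega) le_rfl hpsne]
    rw [← hps_def, if_pos rfl]
    have hlast : j ≤ ps.getLastD 0 := le_getLastD_of_pairwise ps hppw _ hqmem
    have hhead : ps.headD 0 ≤ i := headD_le_of_pairwise ps hppw i hpmem
    exact decide_eq_false (by omega)
  · push_neg at hle1
    obtain ⟨k, hk, hgt⟩ := hle1
    rw [hA, scan_false cnts _ _ _ ⟨k, hk, by omega⟩]

theorem slot_count_pos (nums : List Int) (v w : Int) (hv : v ∈ nums)
    (hm : PySem.Int.mod v 14 = w) :
    0 < nums.countP (fun u => PySem.Int.mod u 14 == w) :=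
  List.countP_pos_iff.mpr ⟨v, hv, by simp only [beq_iff_eq]; exact hm⟩

theorem isStraight_false_of_dup (nums : List Int) (v : Int)
    (hb : ∀ u ∈ nums, -14 ≤ u ∧ u ≤ 13)
    (hv : v ∈ nums) (hv14 : -14 < v) (hv0 : v ≠ 0) (hd : 2 ≤ nums.count v) :
    isStraight nums = false := by
  obtain ⟨cnts, hrun, hlen, hval⟩ := count_hist nums (List.replicate 14 0) hb (by simp)
  obtain ⟨hvl, hvu⟩ := hb v hv
  have hw0 : PySem.Int.mod v 14 = v % 14 := PySem.Int.mod_eq_emod_of_pos (by norm_num)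
  have hwb : 1 ≤ PySem.Int.mod v 14 ∧ PySem.Int.mod v 14 ≤ 13 := by rw [hw0]; omega
  set w := PySem.Int.mod v 14 with hw_def
  have hcnt : 2 ≤ nums.countP (fun u => PySem.Int.mod u 14 == w) := by
    calc 2 ≤ nums.count v := hd
    _ = nums.countP (fun u => u == v) := List.count_eq_countP
    _ ≤ nums.countP (fun u => PySem.Int.mod u 14 == w) := by
        apply List.countP_mono_left
        intro u _ hu
        have : u = v := by simpa using hu
        simp [this, hw_def]
  have hgt : PySem.List.pyGetD cnts w 0 > 1 := by
    rw [hval w (by omega) (by omega), getD_replicate_zero w (by omega) (by omega)]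
    have : (2 : Int) ≤ (nums.countP (fun u => PySem.Int.mod u 14 == w) : Int) := by
      exact_mod_cast hcnt
    omega
  rw [isStraight, hrun]
  exact scan_false cnts _ _ _ ⟨w, PySem.List.mem_pyRange_one.mpr ⟨by omega, by omega⟩, hgt⟩

theorem isStraight_main (nums : List Int) (hpre : ∀ v ∈ nums, 0 ≤ v ∧ v ≤ 13) :
    isStraight nums = isStraight_alt nums := by
  obtain ⟨cnts, hrun, hlen, hval⟩ := count_hist nums (List.replicate 14 0)
    (fun v hv => ⟨by have := (hpre v hv).1; omega, (hpre v hv).2⟩) (by simp)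
  have hval0 : ∀ i : Int, 0 ≤ i → i < 14 →
      PySem.List.pyGetD cnts i 0 = (nums.countP (fun v => v == i) : Int) := by
    intro i h0 h14
    rw [hval i h0 h14, getD_replicate_zero i h0 h14]
    have hcp : nums.countP (fun v => PySem.Int.mod v 14 == i) = nums.countP (fun v => v == i) := by
      apply List.countP_congr
      intro v hv
      obtain ⟨h0v, h13v⟩ := hpre v hv
      have hm : PySem.Int.mod v 14 = v := by
        rw [PySem.Int.mod_eq_emod_of_pos (by norm_num)]
        omega
      rw [hm]
    rw [hcp]; ring
  have hA : isStraight nums = scanLoop cnts (PySem.List.pyRange 1 14 1) 0 0 := by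
    rw [isStraight, hrun]
  set fs := nums.filter (fun v => v != 0) with hfs_def
  set cards := PySem.List.sorted fs (fun x : Int => x) false with hcards_def
  have hperm : cards.Perm fs := PySem.List.sorted_perm fs _ false
  have hmemc : ∀ x, x ∈ cards ↔ x ∈ fs := fun x => hperm.mem_iff
  have hcards : ∀ x ∈ cards, 1 ≤ x ∧ x ≤ 13 := by
    intro x hx
    rw [hmemc x, hfs_def, List.mem_filter] at hx
    obtain ⟨hmem, hne⟩ := hx
    obtain ⟨h0, h13⟩ := hpre x hmem
    simp only [bne_iff_ne, ne_eq] at hne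
    omega
  have hcount : ∀ i : Int, i ≠ 0 →
      (nums.countP (fun v => v == i) : Int) = cards.count i := by
    intro i hi
    rw [hperm.count_eq, hfs_def, List.count_eq_countP, List.countP_filter]
    congr 1
    apply List.countP_congr
    intro v _
    simp only [beq_iff_eq, Bool.and_eq_true, bne_iff_ne, ne_eq]
    constructor
    · rintro rfl; exact ⟨rfl, fun e => hi e⟩
    · rintro ⟨h, -⟩; exact h
  have hple : cards.Pairwise (· ≤ ·) := PySem.List.sorted_pairwise fs (fun x : Int => x) 
  by_cases hnd : cards.Nodup
  · -- no duplicate real card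
    have hadj : hasAdjDup cards = false := (hasAdjDup_false_iff cards hple).mpr hnd
    have hle1 : ∀ i ∈ PySem.List.pyRange 1 14 1, PySem.List.pyGetD cnts i 0 ≤ 1 := by
      intro i hi
      obtain ⟨h1, h2⟩ := PySem.List.mem_pyRange_one.mp hi
      rw [hval0 i (by omega) h2, hcount i (by omega)]
      have := List.nodup_iff_count_le_one.mp hnd i
      exact_mod_cast this
    have hcong : ∀ i ∈ PySem.List.pyRange 1 14 1,
        (fun i => decide (PySem.List.pyGetD cnts i 0 > 0)) i = (fun i => decide (i ∈ cards)) i := by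
      intro i hi
      obtain ⟨h1, h2⟩ := PySem.List.mem_pyRange_one.mp hi
      show decide (PySem.List.pyGetD cnts i 0 > 0) = decide (i ∈ cards)
      rw [hval0 i (by omega) h2, hcount i (by omega)]
      simp [List.count_pos_iff]
    rw [hA, scan_eq_scanB cnts _ _ _ hle1,
      scanB_congr _ (fun i => decide (i ∈ cards)) _ _ _ hcong]
    set d := fun i => decide (i ∈ cards) with hd_def
    set ps := (PySem.List.pyRange 1 14 1).filter d with hps_def
    have hmem_ps : ∀ x, x ∈ ps ↔ x ∈ cards := by
      intro x
      rw [hps_def, List.mem_filter]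
      constructor
      · rintro ⟨-, hx⟩; simpa [hd_def] using hx
      · intro hx
        obtain ⟨h1, h2⟩ := hcards x hx
        exact ⟨PySem.List.mem_pyRange_one.mpr ⟨by omega, by omega⟩, by simp [hd_def, hx]⟩
    have hps_eq : ps = cards := by
      apply eq_of_pairwise_lt_of_mem_iff
      · exact List.Pairwise.filter d (PySem.List.pairwise_lt_pyRange_one 1 14)
      · exact pairwise_lt_of_le_nodup cards hple hnd
      · exact hmem_ps
    cases hc : cards with
    | nil =>
      have hpsnil : ps = [] := by rw [hps_eq, hc]
      rw [scanB_nil_filter d _ _ _ hpsnil]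
      rw [isStraight_alt]
      simp only [← hfs_def, ← hcards_def, hc]
      decide
    | cons c rest =>
      have hpsne : ps ≠ [] := by rw [hps_eq, hc]; simp
      rw [scanB_filter d _ _ _ (fun i hi => by
            have := (PySem.List.mem_pyRange_one.mp hi).1; omega) le_rfl hpsne]
      rw [isStraight_alt]
      simp only [← hfs_def, ← hcards_def, hc]
      rw [← hps_def, hps_eq, hc]
      rw [hc] at hadj
      simp [hadj]
  · -- duplicate real card: both sides are false
    have hdup : ∃ a, 1 < cards.count a := by
      by_contra h
      exact hnd (List.nodup_iff_count_le_one.mpr (fun a => by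
        rcases Nat.lt_or_ge 1 (cards.count a) with hgt | hle
        · exact absurd ⟨a, hgt⟩ h
        · omega))
    obtain ⟨a, ha⟩ := hdup
    have hamem : a ∈ cards := List.count_pos_iff.mp (by omega)
    obtain ⟨ha1, ha2⟩ := hcards a hamem
    have hgt : PySem.List.pyGetD cnts a 0 > 1 := by
      rw [hval0 a (by omega) (by omega), hcount a (by omega)]
      exact_mod_cast ha
    have hadj : hasAdjDup cards = true := by
      cases h : hasAdjDup cards with
      | true => rfl
      | false => exact absurd ((hasAdjDup_false_iff cards hple).mp h) hnd
    rw [hA, scan_false cnts _ _ _ ⟨a, PySem.List.mem_pyRange_one.mpr ⟨by omega, by omega⟩, hgt⟩]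
    cases hc : cards with
    | nil => rw [hc] at hamem; simp at hamem
    | cons c rest =>
      rw [isStraight_alt]
      simp only [← hfs_def, ← hcards_def, hc]
      rw [hc] at hadj
      simp [hadj]


theorem scanLoop_congr (c1 c2 : List Int) (is : List Int) :
    ∀ st ed, (∀ i ∈ is, PySem.List.pyGetD c1 i 0 = PySem.List.pyGetD c2 i 0) →
    scanLoop c1 is st ed = scanLoop c2 is st ed := by
  induction is with
  | nil => intros; rfl
  | cons j rest ih =>
    intro st ed h
    simp only [scanLoop, h j (by simp)]
    split_ifs <;> first | rfl | exact ih _ _ (fun i hi => h i (by simp [hi]))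

theorem isStraight_shift (nums : List Int) (h : ∀ v ∈ nums, -14 < v ∧ v ≤ 0) :
    isStraight nums = isStraight (nums.map (fun v => if v < 0 then v + 14 else v)) := by
  obtain ⟨c1, hr1, hl1, hv1⟩ := count_hist nums (List.replicate 14 0)
    (fun v hv => ⟨by have := (h v hv).1; omega, by have := (h v hv).2; omega⟩) (by simp)
  obtain ⟨c2, hr2, hl2, hv2⟩ := count_hist (nums.map (fun v => if v < 0 then v + 14 else v))
    (List.replicate 14 0)
    (fun u hu => by
      obtain ⟨v, hv, rfl⟩ := List.mem_map.mp hu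
      have hb := h v hv
      constructor <;> split_ifs <;> omega) (by simp)
  rw [isStraight, isStraight, hr1, hr2]
  apply scanLoop_congr
  intro i hi
  obtain ⟨h1, h2⟩ := PySem.List.mem_pyRange_one.mp hi
  rw [hv1 i (by omega) h2, hv2 i (by omega) h2, List.countP_map]
  have hpc : List.countP ((fun v => PySem.Int.mod v 14 == i) ∘ fun v => if v < 0 then v + 14 else v) nums
      = List.countP (fun v => PySem.Int.mod v 14 == i) nums := by
    apply List.countP_congr
    intro v hv
    obtain ⟨hvl, hvu⟩ := h v hv
    have e1 : PySem.Int.mod v 14 = v % 14 := PySem.Int.mod_eq_emod_of_pos (by norm_num)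
    have e2 : PySem.Int.mod (if v < 0 then v + 14 else v) 14 =
        (if v < 0 then v + 14 else v) % 14 := PySem.Int.mod_eq_emod_of_pos (by norm_num)
    have hmm : PySem.Int.mod (if v < 0 then v + 14 else v) 14 = PySem.Int.mod v 14 := by
      rw [e1, e2]; split_ifs <;> omega
    simp only [Function.comp_apply, hmm]
  rw [hpc]

theorem hasAdjDup_map_add (l : List Int) :
    hasAdjDup (l.map (fun x => x + 14)) = hasAdjDup l := by
  induction l with
  | nil => rfl
  | cons a t ih =>
    cases t with
    | nil => rfl
    | cons b t2 =>
      simp only [List.map_cons, hasAdjDup]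
      by_cases h : a = b
      · rw [if_pos (by omega), if_pos h]
      · rw [if_neg (by omega), if_neg h]
        simpa using ih

theorem getLastD_map_add (l : List Int) (c : Int) :
    ((c :: l).map (fun x => x + 14)).getLastD 0 = (c :: l).getLastD 0 + 14 := by
  induction l generalizing c with
  | nil => rfl
  | cons b t ih => simpa using ih b

theorem alt_shift (nums : List Int) (h : ∀ v ∈ nums, -14 < v ∧ v ≤ 0) :
    isStraight_alt nums = isStraight_alt (nums.map (fun v => if v < 0 then v + 14 else v)) := by
  set sh := fun v : Int => if v < 0 then v + 14 else v with hsh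
  set fs := nums.filter (fun v => v != 0) with hfs_def
  set cards := PySem.List.sorted fs (fun x : Int => x) false with hcards_def
  have hfs2 : (nums.map sh).filter (fun v => v != 0) = fs.map sh := by
    rw [List.filter_map]
    congr 1
    rw [hfs_def]
    apply List.filter_congr
    intro v hv
    obtain ⟨hl, hu⟩ := h v hv
    by_cases hv0 : v = 0
    · subst hv0; simp [hsh]
    · have hne : ¬ (if v < 0 then v + 14 else v) = 0 := by split_ifs <;> omega
      have h1 : ((if v < 0 then v + 14 else v) != 0) = true := by simpa using hne
      have h2 : (v != 0) = true := by simpa using hv0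
      simp only [hsh, Function.comp_apply]
      rw [h1, h2]
  have hmap_on : ∀ x ∈ fs, sh x = x + 14 := by
    intro x hx
    rw [hfs_def] at hx
    obtain ⟨hm, hne⟩ := List.mem_filter.mp hx
    obtain ⟨hl, hu⟩ := h x hm
    have hx0 : x < 0 := by simp at hne; omega
    simp [hsh, hx0]
  have hfs3 : fs.map sh = fs.map (fun x => x + 14) := List.map_congr_left hmap_on
  have hsorted : PySem.List.sorted ((nums.map sh).filter (fun v => v != 0)) (fun x : Int => x) false
      = cards.map (fun x => x + 14) := by
    rw [hfs2, hfs3]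
    apply PySem.List.sorted_id_eq_of_perm_of_pairwise
    · exact (PySem.List.sorted_perm fs (fun x : Int => x) false).map _
    · exact List.Pairwise.map _ (fun hab => by omega)
        (PySem.List.sorted_pairwise fs (fun x : Int => x))
  cases hc : cards with
  | nil =>
    rw [isStraight_alt, isStraight_alt]
    simp only [← hfs_def, ← hcards_def, hsorted, hc]
    simp
  | cons c rest =>
    rw [isStraight_alt, isStraight_alt]
    simp only [← hfs_def, ← hcards_def, hsorted, hc, List.map_cons]
    have hadj := hasAdjDup_map_add (c :: rest)
    rw [List.map_cons] at hadj
    by_cases ha : hasAdjDup (c :: rest) = true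
    · rw [ha] at hadj
      simp [ha, hadj]
    · have hadj2 : hasAdjDup ((c + 14) :: rest.map (fun x => x + 14)) = false := by
        rw [hadj]; exact Bool.eq_false_iff.mpr ha
      simp only [ha, Bool.false_eq_true, if_false, hadj2]
      have hgl := getLastD_map_add rest c
      rw [List.map_cons] at hgl
      rw [hgl]
      congr 1
      have : (c :: rest).getLastD 0 + 14 - (c + 14) = (c :: rest).getLastD 0 - c := by ring
      rw [this]

-- ===== VERDICT (by name: the statement is the Claim_ definition above) =====
theorem isStraight_spec : Claim_equal_isStraight := by
  intro nums _ hpre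
  unfold Pre_isStraight at hpre
  unfold Spec_isStraight
  obtain ⟨hb, hcase⟩ := hpre
  rcases hcase with hnn | hnp | ⟨a, ha, b2, hbm, h5ab, hsgn⟩ | ⟨v, hv, hv0, hv14, hd⟩
  · exact isStraight_main nums (fun v hv => ⟨hnn v hv, (hb v hv).2⟩)
  · -- no positive card, no -14: the wraparound shifts every card equally
    rw [isStraight_shift nums hnp, alt_shift nums hnp]
    apply isStraight_main
    intro u hu
    obtain ⟨v, hv, rfl⟩ := List.mem_map.mp hu
    have := hnp v hv
    constructor <;> split_ifs <;> omega
  · obtain ⟨hal, hau⟩ := hb a ha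
    obtain ⟨hbl, hbu⟩ := hb b2 hbm
    have hB : isStraight_alt nums = false :=
      alt_false_of_span nums a b2 ha hbm (by rcases hsgn with ⟨h,-⟩|⟨-,h⟩|⟨-,h,-⟩ <;> omega)
        (by rcases hsgn with ⟨-,h⟩|⟨-,h⟩|⟨-,-,h,-⟩ <;> omega) h5ab
    rcases hsgn with ⟨ha0, hb0⟩ | ⟨ha14, hb0⟩ | ⟨ha14, ha0, hb0, h9 | h19⟩
    · -- both positive: slots a and b2
      rw [isStraight_false_of_slots nums a b2 hb (by omega) hbu h5ab
          (slot_count_pos nums a a ha (by rw [PySem.Int.mod_eq_emod_of_pos (by norm_num)]; omega))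
          (slot_count_pos nums b2 b2 hbm (by rw [PySem.Int.mod_eq_emod_of_pos (by norm_num)]; omega)), hB]
    · -- both negative: slots a+14 and b2+14
      rw [isStraight_false_of_slots nums (a + 14) (b2 + 14) hb (by omega) (by omega) (by omega)
          (slot_count_pos nums a (a + 14) ha (by rw [PySem.Int.mod_eq_emod_of_pos (by norm_num)]; omega))
          (slot_count_pos nums b2 (b2 + 14) hbm (by rw [PySem.Int.mod_eq_emod_of_pos (by norm_num)]; omega)), hB]
    · -- mixed, distance 5..9: slots b2 and a+14
      rw [isStraight_false_of_slots nums b2 (a + 14) hb (by omega) (by omega) (by omega)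
          (slot_count_pos nums b2 b2 hbm (by rw [PySem.Int.mod_eq_emod_of_pos (by norm_num)]; omega))
          (slot_count_pos nums a (a + 14) ha (by rw [PySem.Int.mod_eq_emod_of_pos (by norm_num)]; omega)), hB]
    · -- mixed, distance >= 19: slots a+14 and b2
      rw [isStraight_false_of_slots nums (a + 14) b2 hb (by omega) (by omega) (by omega)
          (slot_count_pos nums a (a + 14) ha (by rw [PySem.Int.mod_eq_emod_of_pos (by norm_num)]; omega))
          (slot_count_pos nums b2 b2 hbm (by rw [PySem.Int.mod_eq_emod_of_pos (by norm_num)]; omega)), hB]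
  · rw [isStraight_false_of_dup nums v hb hv hv14 hv0 hd,
        alt_false_of_dup nums v hv hv0 hd]
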